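-- pv_equiv track=rewrite | github.com/AdamKing11/Ngram_Informativity | code/up.py | calculate_up
-- ===== SOURCE A (Python) =====
-- def update_cohort(word, cohort, step):
-- 	"""
-- 	semi-recursive implementation of cohort calculation
-- 	basically, we get a cohort in, we check to see if our
-- 	current word "matches" a cohort member at a particular segment
-- 	and if not, we toss it out of the cohort
-- 	we then return the new cohort and increase the step and go again
-- 	"""
-- 	new_cohort = {}
-- 	found_matches = False
-- 	for v in sorted(cohort):
-- 		if len(v) <= step:
-- 			continue
-- 		if word[step] == v[step]:
-- 			new_cohort[v] = 1
-- 			found_matches = True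
-- 		elif found_matches:
-- 			break
-- 	return new_cohort
--
-- def calculate_up(word, cohort):
-- 	"""
-- 	using the update_cohort method, we start at 0 (first char) and
-- 	check each word in our starting cohort to find matches
-- 	we then increase the step and check all of the words that made the
-- 	cut at step 0
-- 	we iterate until there are no words EXCEPT the original, ie it's
-- 	unique
-- 	"""
-- 	up = len(word)-1
-- 	cohort_history = [1 for _ in range(len(word))]
-- 	for i in range(len(word)):
-- 		new_cohort = update_cohort(word, cohort, i)
-- 		cohort_history[i] = len(new_cohort)
-- 		cohort = new_cohort
-- 		if len(new_cohort) == 1: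
-- 			up = i
-- 			break
-- 	return up, cohort_history
-- ===== SOURCE B (Python) =====
-- def calculate_up(word, cohort):
--     """
--     One pass over the distinct cohort words: bucket each by the length of its
--     common prefix with `word`; the cohort size after i+1 characters is then a
--     running difference over the buckets, which is constant 0 past the largest
--     bucket index, so the scan stops there and the tail is filled in one step.
--     """
--     n = len(word)
--     cnt = [0] * (n + 1)
--     mx = 0
--     distinct = set(cohort)
--     for v in distinct:
--         m = 0
--         lv = len(v)
--         while m < n and m < lv and v[m] == word[m]:
--             m += 1
--         cnt[m] += 1
--         if m > mx:
--             mx = m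
--     up = n - 1
--     history = [1] * n
--     run = len(distinct)
--     for i in range(mx):
--         run -= cnt[i]
--         history[i] = run
--         if run == 1:
--             up = i
--             break
--     else:
--         if mx < n:
--             history[mx:] = [0] * (n - mx)
--     return up, history
-- ===== Notes on version B (the rewrite author's own statement) =====
-- stated objective: faster
-- what changed: A re-sorts and re-filters the shrinking cohort dict at every character position; B makes one pass over the distinct cohort words, buckets each by the length of its common prefix with the word, and reads the cohort-size history and uniqueness point off a running difference over the buckets, filling the all-zero tail past the largest bucket in one step.
import Mathlib
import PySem

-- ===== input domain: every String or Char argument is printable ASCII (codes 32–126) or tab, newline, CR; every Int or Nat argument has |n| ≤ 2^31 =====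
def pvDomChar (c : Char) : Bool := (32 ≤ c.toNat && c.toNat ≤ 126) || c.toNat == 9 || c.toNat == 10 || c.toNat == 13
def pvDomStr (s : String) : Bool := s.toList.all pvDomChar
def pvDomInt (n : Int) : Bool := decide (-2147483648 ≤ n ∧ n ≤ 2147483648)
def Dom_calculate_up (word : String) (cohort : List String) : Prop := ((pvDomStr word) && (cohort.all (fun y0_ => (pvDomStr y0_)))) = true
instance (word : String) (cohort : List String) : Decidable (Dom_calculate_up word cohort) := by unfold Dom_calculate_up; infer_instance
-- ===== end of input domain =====

-- B replaces A's per-position re-sort-and-filter of the cohort by a single pass that buckets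
-- each distinct cohort word under the length of its common prefix with `word` (objective: faster).

-- ===== PORT A =====
-- the 'for v in sorted(cohort)' loop of update_cohort, with its break ('elif found_matches');
-- word[step] and v[step]: both indices are in range at every call site (step < len(word), step < len(v))
def updateLoop (word : String) (step : Int) : List String → PySem.Dict String Int → Bool → PySem.Dict String Int
  | [], d, _ => d
  | v :: rest, d, fm =>
    if (PySem.Str.len v : Int) ≤ step then updateLoop word step rest d fm
    else if PySem.Str.pyGet? word step = PySem.Str.pyGet? v step then
      updateLoop word step rest (d.insert v 1) true
    else if fm then d
    else updateLoop word step rest d fm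

def update_cohort (word : String) (cohort : List String) (step : Int) : PySem.Dict String Int :=
  updateLoop word step (PySem.List.sorted cohort (fun x => x) false) PySem.Dict.empty false

-- the 'for i in range(len(word))' loop; the dict-valued cohort is passed on as its key list,
-- which is exactly what 'sorted(cohort)' iterates over at the next step
def calcLoop (word : String) : List Int → List String → List Int → Int → Int × List Int
  | [], _, hist, up => (up, hist)
  | i :: rest, cohort, hist, up =>
    let d := update_cohort word cohort i
    let hist' := PySem.List.pySetD hist i ((PySem.Dict.size d : Int))
    if PySem.Dict.size d = 1 then (i, hist')
    else calcLoop word rest d.keys hist' up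

def calculate_up (word : String) (cohort : List String) : Int × List Int :=
  calcLoop word (PySem.List.pyRange 0 (PySem.Str.len word) 1) cohort
    ((PySem.List.pyRange 0 (PySem.Str.len word) 1).map (fun _ => (1 : Int)))
    ((PySem.Str.len word : Int) - 1)

-- ===== PORT B =====
-- Source B's 'while m < n and m < lv and v[m] == word[m]: m += 1' (both indices in range under the guard)
def matchlen (word v : List Char) (m : Nat) : Nat :=
  if m < word.length ∧ m < v.length ∧ v[m]? = word[m]? then matchlen word v (m+1) else m
termination_by word.length - m

-- Source B's 'for i in range(mx)' scan with its break, and the for-else tail fill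
-- 'history[mx:] = [0]*(n-mx)' (a slice assignment on a length-n list: take mx, append zeros)
def histLoop2 (cnt : List Int) (n mx : Nat) (up : Int) : List Int → Int → List Int → Int × List Int
  | [], _, hist =>
      (up, if mx < n then hist.take mx ++ List.replicate (n - mx) (0 : Int) else hist)
  | i :: rest, run, hist =>
      let run' := run - PySem.List.pyGetD cnt i 0
      let hist' := PySem.List.pySetD hist i run'
      if run' = 1 then (i, hist') else histLoop2 cnt n mx up rest run' hist'

-- 'cnt[m] += 1' is List.set/getD at the Nat index m ≤ len(word): always nonnegative and in range
def calculate_up_alt (word : String) (cohort : List String) : Int × List Int :=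
  let n := word.toList.length
  let distinct := PySem.Set.ofList cohort
  let cm := distinct.foldl
    (fun s v =>
      (s.1.set (matchlen word.toList v.toList 0)
        ((s.1.getD (matchlen word.toList v.toList 0) 0) + 1),
       if matchlen word.toList v.toList 0 > s.2 then matchlen word.toList v.toList 0 else s.2))
    (List.replicate (n+1) (0 : Int), 0)
  histLoop2 cm.1 n cm.2 ((n : Int) - 1) (PySem.List.pyRange 0 (cm.2 : Int) 1)
    ((PySem.Set.len distinct : Int)) (List.replicate n (1 : Int))

-- ===== PRECONDITION & SPEC =====
def Spec_calculate_up (word : String) (cohort : List String) (out : Int × List Int) : Prop := out = calculate_up_alt word cohort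
instance (word : String) (cohort : List String) (out : Int × List Int) : Decidable (Spec_calculate_up word cohort out) := by unfold Spec_calculate_up; infer_instance

-- ===== CLAIM (what is proved, stated in full; the proofs are below) =====
def Claim_equal_calculate_up : Prop := ∀ (word : String) (cohort : List String), Dom_calculate_up word cohort → Spec_calculate_up word cohort (calculate_up word cohort)

-- ===== LEMMAS AND PROOFS =====

-- length of the longest common prefix of two character lists
def lcpLen : List Char → List Char → Nat
  | a :: as, b :: bs => if b = a then lcpLen as bs + 1 else 0
  | _, _ => 0

-- 'v is still in the cohort after reading i+1 characters of word'
def pMatch (word : List Char) (i : Nat) (v : String) : Bool := decide (i + 1 ≤ lcpLen word v.toList)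

-- number of distinct cohort words agreeing with word on the first i+1 characters
def Ncount (word : String) (cohort : List String) (i : Nat) : Int :=
  (((PySem.Set.ofList cohort).countP (pMatch word.toList i) : Nat) : Int)

-- common reference form of the final scan of both programs
def refLoop (N : Nat → Int) (up : Int) : List Nat → List Int → Int × List Int
  | [], hist => (up, hist)
  | i :: rest, hist =>
    let hist' := hist.set i (N i)
    if N i = 1 then ((i : Int), hist') else refLoop N up rest hist'

theorem lcpLen_le_left (a b : List Char) : lcpLen a b ≤ a.length := by
  induction a generalizing b with
  | nil => simp [lcpLen]
  | cons x as ih =>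
    cases b with
    | nil => simp [lcpLen]
    | cons y bs =>
      simp only [lcpLen]
      split
      · simpa using ih bs
      · simp

theorem lcpLen_le_right (a b : List Char) : lcpLen a b ≤ b.length := by
  induction a generalizing b with
  | nil => simp [lcpLen]
  | cons x as ih =>
    cases b with
    | nil => simp [lcpLen]
    | cons y bs =>
      simp only [lcpLen]
      split
      · simpa using ih bs
      · simp

theorem le_lcpLen_iff (i : Nat) (a b : List Char) :
    i ≤ lcpLen a b ↔ i ≤ a.length ∧ i ≤ b.length ∧ b.take i = a.take i := by
  induction i generalizing a b with
  | zero => simp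
  | succ i ih =>
    cases a with
    | nil => simp [lcpLen]
    | cons x as =>
      cases b with
      | nil => simp [lcpLen]
      | cons y bs =>
        simp only [lcpLen, List.length_cons, List.take_succ_cons]
        split
        · rename_i hyx
          subst hyx
          rw [Nat.succ_le_succ_iff, ih, Nat.succ_le_succ_iff, Nat.succ_le_succ_iff]
          constructor
          · rintro ⟨h1, h2, h3⟩; exact ⟨h1, h2, by rw [h3]⟩
          · rintro ⟨h1, h2, h3⟩; exact ⟨h1, h2, by injection h3⟩
        · rename_i hyx
          constructor
          · omega
          · rintro ⟨-, -, h3⟩; injection h3; simp_all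

theorem matchlen_eq (a b : List Char) (m : Nat) :
    matchlen a b m = m + lcpLen (a.drop m) (b.drop m) := by
  fun_induction matchlen a b m with
  | case1 m h ih =>
    obtain ⟨h1, h2, h3⟩ := h
    rw [ih]
    rw [List.drop_eq_getElem_cons h1, List.drop_eq_getElem_cons h2]
    rw [List.getElem?_eq_getElem h1, List.getElem?_eq_getElem h2] at h3
    simp only [lcpLen]
    rw [if_pos (by injection h3)]
    omega
  | case2 m h =>
    push Not at h
    rcases Nat.lt_or_ge m a.length with ha | ha
    · rcases Nat.lt_or_ge m b.length with hb | hb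
      · have h3 := h ha hb
        rw [List.drop_eq_getElem_cons ha, List.drop_eq_getElem_cons hb]
        simp only [lcpLen]
        rw [List.getElem?_eq_getElem ha, List.getElem?_eq_getElem hb] at h3
        rw [if_neg (by intro he; exact h3 (by rw [he]))]
        omega
      · rw [List.drop_eq_nil_of_le hb]
        cases hd : a.drop m <;> simp [lcpLen]
    · rw [List.drop_eq_nil_of_le ha]
      simp [lcpLen]

theorem matchlen_zero (a b : List Char) : matchlen a b 0 = lcpLen a b := by
  rw [matchlen_eq]; simp

theorem lex_nth_le (i : Nat) (as bs : List Char) (ht : as.take i = bs.take i)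
    (ha : i < as.length) (hb : i < bs.length) (hle : as ≤ bs) :
    as[i] ≤ bs[i] := by
  induction i generalizing as bs with
  | zero =>
    cases as with
    | nil => simp at ha
    | cons x as' =>
      cases bs with
      | nil => simp at hb
      | cons y bs' =>
        simp only [List.getElem_cons_zero]
        by_contra hxy
        push Not at hxy
        exact absurd (List.cons_lt_cons_iff.mpr (Or.inl hxy)) (not_lt_of_ge hle)
  | succ i ih =>
    cases as with
    | nil => simp at ha
    | cons x as' =>
      cases bs with
      | nil => simp at hb
      | cons y bs' =>
        simp only [List.take_succ_cons, List.cons.injEq] at ht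
        obtain ⟨hxy, ht'⟩ := ht
        subst hxy
        simp only [List.getElem_cons_succ]
        apply ih as' bs' ht' (by simpa using ha) (by simpa using hb)
        rcases lt_or_eq_of_le hle with hlt | heq
        · rcases List.cons_lt_cons_iff.mp hlt with h | ⟨-, h⟩
          · exact absurd h (lt_irrefl x)
          · exact le_of_lt h
        · injection heq with _ h; exact le_of_eq h

theorem lcp_char_eq (a b : List Char) (i : Nat) (h : i + 1 ≤ lcpLen a b) : b[i]? = a[i]? := by
  obtain ⟨ha, hb, ht⟩ := (le_lcpLen_iff (i+1) a b).mp h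
  have := congrArg (fun l => l[i]?) ht
  simpa [List.getElem?_take_of_lt, Nat.lt_succ_self] using this

-- A's inner loop collects, in order, exactly the sorted-cohort words that match at position i
-- (the 'elif found_matches: break' is sound because the list is sorted and shares word[:i])
theorem updateLoop_keys (word : String) (i : Nat) (hi : i < word.toList.length) :
    ∀ (s : List String) (d : PySem.Dict String Int) (fm : Bool),
      s.Pairwise (· ≤ ·) →
      (∀ v ∈ s, i ≤ lcpLen word.toList v.toList) →
      (fm = true → ∃ u : String, i + 1 ≤ lcpLen word.toList u.toList ∧ ∀ v ∈ s, u ≤ v) →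
      (updateLoop word (i : Int) s d fm).keys
        = PySem.Set.update d.keys (s.filter (pMatch word.toList i)) := by
  intro s
  induction s with
  | nil => intro d fm _ _ _; simp [updateLoop, PySem.Set.update_nil]
  | cons v rest ih =>
    intro d fm hpw hmem hfm
    have hpw' := (List.pairwise_cons.mp hpw).2
    have hvle := (List.pairwise_cons.mp hpw).1
    have hvi : i ≤ lcpLen word.toList v.toList := hmem v (List.mem_cons_self ..)
    by_cases hlen : v.toList.length ≤ i
    · -- skipped: too short
      have hpm : pMatch word.toList i v = false := by
        simp only [pMatch, decide_eq_false_iff_not]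
        intro hc
        have := lcpLen_le_right word.toList v.toList
        omega
      simp only [updateLoop, PySem.Str.len_eq]
      rw [if_pos (by exact_mod_cast hlen)]
      rw [List.filter_cons_of_neg (by simp [hpm])]
      exact ih d fm hpw' (fun w hw => hmem w (List.mem_cons_of_mem _ hw))
        (fun h => (hfm h).imp (fun u ⟨h1, h2⟩ => ⟨h1, fun w hw => h2 w (List.mem_cons_of_mem _ hw)⟩))
    · push Not at hlen
      by_cases hch : word.toList[i]? = v.toList[i]?
      · -- match: insert
        have hpm : pMatch word.toList i v = true := by
          simp only [pMatch, decide_eq_true_eq]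
          apply (le_lcpLen_iff (i+1) _ _).mpr
          refine ⟨by omega, by omega, ?_⟩
          rw [List.take_add_one, List.take_add_one]
          obtain ⟨-, -, ht⟩ := (le_lcpLen_iff i _ _).mp hvi
          rw [ht, hch]
        simp only [updateLoop, PySem.Str.len_eq, PySem.Str.pyGet?_natCast]
        rw [if_neg (by push Not; exact_mod_cast hlen), if_pos hch]
        rw [List.filter_cons_of_pos (by simp [hpm]), PySem.Set.update_cons]
        have hkeys : (d.insert v 1).keys = PySem.Set.add d.keys v := by
          by_cases hc : d.contains v = true
          · rw [PySem.Dict.keys_insert_of_contains _ _ hc,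
              PySem.Set.add_of_mem ((PySem.Dict.contains_iff_mem_keys _ _).mp hc)]
          · rw [PySem.Dict.keys_insert_of_not_contains _ _ (by simpa using hc),
              PySem.Set.add_of_not_mem]
            intro hmem'
            exact absurd ((PySem.Dict.contains_iff_mem_keys _ _).mpr hmem') (by simpa using hc)
        rw [← hkeys]
        apply ih _ true hpw' (fun w hw => hmem w (List.mem_cons_of_mem _ hw))
        intro _
        refine ⟨v, by simpa [pMatch] using hpm, hvle⟩
      · -- mismatch
        have hpmv : pMatch word.toList i v = false := by
          simp only [pMatch, decide_eq_false_iff_not]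
          intro hc
          exact hch (lcp_char_eq _ _ _ hc).symm
        simp only [updateLoop, PySem.Str.len_eq, PySem.Str.pyGet?_natCast]
        rw [if_neg (by push Not; exact_mod_cast hlen), if_neg hch]
        cases fm with
        | true =>
          rw [if_pos rfl]
          obtain ⟨u, hu1, hu2⟩ := hfm rfl
          -- no later element matches: the filter is empty
          have hrest : ∀ w ∈ rest, pMatch word.toList i w = false := by
            intro w hw
            simp only [pMatch, decide_eq_false_iff_not]
            intro hc
            -- u matched; u ≤ v so word[i] < v[i]; v ≤ w so word[i] < w[i], contradiction
            obtain ⟨hua, hub, hut⟩ := (le_lcpLen_iff (i+1) _ _).mp hu1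
            obtain ⟨hwa, hwb, hwt⟩ := (le_lcpLen_iff (i+1) _ _).mp hc
            have huv : u.toList.take i = v.toList.take i := by
              obtain ⟨-, -, h1⟩ := (le_lcpLen_iff i _ _).mp (le_trans (Nat.le_succ i) hu1)
              obtain ⟨-, -, h2⟩ := (le_lcpLen_iff i _ _).mp hvi
              rw [h1, h2]
            have hvw : v.toList.take i = w.toList.take i := by
              obtain ⟨-, -, h2⟩ := (le_lcpLen_iff i _ _).mp hvi
              obtain ⟨-, -, h3⟩ := (le_lcpLen_iff i _ _).mp (le_trans (Nat.le_succ i) hc)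
              rw [h2, h3]
            have hul : i < u.toList.length := by omega
            have hwl : i < w.toList.length := by omega
            have h1 : u.toList[i] ≤ v.toList[i] :=
              lex_nth_le i _ _ huv hul hlen (String.le_iff_toList_le.mp (hu2 v (List.mem_cons_self ..)))
            have h2 : v.toList[i] ≤ w.toList[i] :=
              lex_nth_le i _ _ hvw hlen hwl (String.le_iff_toList_le.mp (hvle w hw))
            -- u[i] = word[i] = w[i]
            have hue : u.toList[i]? = word.toList[i]? := lcp_char_eq _ _ _ hu1
            have hwe : w.toList[i]? = word.toList[i]? := lcp_char_eq _ _ _ hc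
            rw [List.getElem?_eq_getElem hul, List.getElem?_eq_getElem hi] at hue
            rw [List.getElem?_eq_getElem hwl, List.getElem?_eq_getElem hi] at hwe
            have hvne : v.toList[i] ≠ word.toList[i] := by
              intro he
              apply hch
              rw [List.getElem?_eq_getElem hi, List.getElem?_eq_getElem hlen, he]
              exact rfl
            injection hue with hue; injection hwe with hwe
            rw [hue] at h1
            rw [hwe] at h2
            exact hvne (le_antisymm h2 h1)
          rw [List.filter_cons_of_neg (by simp [hpmv])]
          rw [List.filter_eq_nil_iff.mpr (by intro w hw; simp [hrest w hw]), PySem.Set.update_nil]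
        | false =>
          rw [if_neg (by simp)]
          rw [List.filter_cons_of_neg (by simp [hpmv])]
          exact ih d false hpw' (fun w hw => hmem w (List.mem_cons_of_mem _ hw)) (by simp)

theorem update_cohort_keys (word : String) (l : List String) (i : Nat)
    (hi : i < word.toList.length) (hl : ∀ v ∈ l, i ≤ lcpLen word.toList v.toList) :
    (update_cohort word l (i : Int)).keys
      = PySem.Set.ofList ((PySem.List.sorted l (fun x => x) false).filter (pMatch word.toList i)) := by
  unfold update_cohort
  rw [updateLoop_keys word i hi _ _ _
    (by simpa using PySem.List.sorted_pairwise l (fun x => x))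
    (fun v hv => hl v ((PySem.List.mem_sorted ..).mp hv))
    (by simp)]
  rw [PySem.Dict.keys_empty, PySem.Set.update_nil_left]

theorem keys_card (word : String) (cohort : List String) (l : List String) (i : Nat)
    (hi : i < word.toList.length)
    (hinv : ∀ v, v ∈ l ↔ v ∈ cohort ∧ i ≤ lcpLen word.toList v.toList) :
    ((update_cohort word l (i : Int)).keys.length : Int) = Ncount word cohort i := by
  have hl : ∀ v ∈ l, i ≤ lcpLen word.toList v.toList := fun v hv => ((hinv v).mp hv).2
  rw [update_cohort_keys word l i hi hl]
  unfold Ncount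
  rw [List.countP_eq_length_filter]
  congr 1
  apply List.Perm.length_eq
  apply (List.perm_ext_iff_of_nodup (PySem.Set.nodup_ofList _)
    ((PySem.Set.nodup_ofList _).filter _)).mpr
  intro x
  rw [PySem.Set.mem_ofList, List.mem_filter, List.mem_filter, PySem.List.mem_sorted,
    PySem.Set.mem_ofList]
  constructor
  · rintro ⟨hx, hp⟩
    exact ⟨((hinv x).mp hx).1, hp⟩
  · rintro ⟨hx, hp⟩
    refine ⟨(hinv x).mpr ⟨hx, ?_⟩, hp⟩
    have := of_decide_eq_true hp
    omega

theorem keys_mem (word : String) (cohort : List String) (l : List String) (i : Nat)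
    (hi : i < word.toList.length)
    (hinv : ∀ v, v ∈ l ↔ v ∈ cohort ∧ i ≤ lcpLen word.toList v.toList) :
    ∀ v, v ∈ (update_cohort word l (i : Int)).keys ↔
      v ∈ cohort ∧ i + 1 ≤ lcpLen word.toList v.toList := by
  intro v
  rw [update_cohort_keys word l i hi (fun v hv => ((hinv v).mp hv).2)]
  rw [PySem.Set.mem_ofList, List.mem_filter, PySem.List.mem_sorted]
  unfold pMatch
  constructor
  · rintro ⟨hx, hp⟩
    exact ⟨((hinv v).mp hx).1, of_decide_eq_true hp⟩
  · rintro ⟨hx, hp⟩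
    exact ⟨(hinv v).mpr ⟨hx, by omega⟩, decide_eq_true hp⟩

-- A's outer loop is the reference scan over the per-position cohort counts
theorem calcLoop_eq (word : String) (cohort : List String) :
    ∀ (k i : Nat) (l : List String) (hist : List Int) (up : Int),
      i + k = word.toList.length →
      (∀ v, v ∈ l ↔ v ∈ cohort ∧ i ≤ lcpLen word.toList v.toList) →
      calcLoop word (PySem.List.pyRange (i : Int) (word.toList.length : Int) 1) l hist up
        = refLoop (Ncount word cohort) up (List.range' i k) hist := by
  intro k
  induction k with
  | zero =>
    intro i l hist up hik hinv
    rw [PySem.List.pyRange_one_eq_nil (by exact_mod_cast (by omega : word.toList.length ≤ i))]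
    simp [calcLoop, refLoop]
  | succ k ih =>
    intro i l hist up hik hinv
    have hi : i < word.toList.length := by omega
    rw [PySem.List.pyRange_one_cons (by exact_mod_cast hi)]
    simp only [calcLoop]
    have hsize : ((PySem.Dict.size (update_cohort word l (i : Int))) : Int)
        = Ncount word cohort i := by
      rw [← keys_card word cohort l i hi hinv]
      congr 1
      simp [PySem.Dict.size, PySem.Dict.keys]
    rw [List.range'_succ]
    simp only [refLoop]
    have hset : PySem.List.pySetD hist (i : Int) ((PySem.Dict.size (update_cohort word l (i : Int))) : Int)
        = hist.set i (Ncount word cohort i) := by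
      rw [PySem.List.pySetD_natCast, hsize]
    by_cases h1 : Ncount word cohort i = 1
    · rw [if_pos (by exact_mod_cast hsize.trans h1), if_pos h1, hset]
    · rw [if_neg (by intro hc; exact h1 (by exact_mod_cast hsize.symm.trans (by exact_mod_cast congrArg (Nat.cast : Nat → Int) hc))), if_neg h1, hset]
      have : ((i : Int) + 1) = ((i + 1 : Nat) : Int) := by omega
      rw [this]
      apply ih (i+1) _ _ up (by omega)
      intro v
      rw [keys_mem word cohort l i hi hinv v]

theorem foldl_bump_getD (g : String → Nat) :
    ∀ (l : List String) (cnt : List Int) (j : Nat),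
      (∀ v ∈ l, g v < cnt.length) →
      (l.foldl (fun cnt v => cnt.set (g v) ((cnt.getD (g v) 0) + 1)) cnt).getD j 0
        = cnt.getD j 0 + ((l.countP (fun v => g v == j)) : Int) := by
  intro l
  induction l with
  | nil => intro cnt j _; simp
  | cons v rest ih =>
    intro cnt j hg
    rw [List.foldl_cons, ih _ j (by intro w hw; rw [List.length_set]; exact hg w (List.mem_cons_of_mem _ hw))]
    rw [List.countP_cons]
    have hv := hg v (List.mem_cons_self ..)
    by_cases hj : g v = j
    · subst hj
      rw [List.getD_eq_getElem?_getD, List.getD_eq_getElem?_getD,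
        List.getElem?_set_self (by omega), List.getElem?_eq_getElem hv]
      simp
      omega
    · rw [List.getD_eq_getElem?_getD, List.getD_eq_getElem?_getD,
        List.getElem?_set_ne (by omega)]
      simp [hj]

theorem countP_split (l : List String) (g : String → Nat) (s : Nat) :
    l.countP (fun v => decide (s ≤ g v))
      = l.countP (fun v => g v == s) + l.countP (fun v => decide (s + 1 ≤ g v)) := by
  induction l with
  | nil => simp
  | cons v rest ih =>
    simp only [List.countP_cons, ih]
    by_cases h : g v = s
    · simp [h]; omega
    · by_cases h2 : s + 1 ≤ g v
      · have : s ≤ g v := by omega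
        simp [h, h2, this]; omega
      · by_cases h3 : s ≤ g v
        · omega
        · simp [h, h2, h3]

-- a run of positions past every bucket writes only zeros: it is the tail fill
theorem refLoop_zeros (N : Nat → Int) (up : Int) (n : Nat) :
    ∀ (m i : Nat) (hist : List Int), i + m = n → hist.length = n →
      (∀ j, i ≤ j → N j = 0) →
      refLoop N up (List.range' i m) hist = (up, hist.take i ++ List.replicate m (0 : Int)) := by
  intro m
  induction m with
  | zero =>
    intro i hist him hlen _
    simp only [List.range'_zero, refLoop, List.replicate_zero, List.append_nil]
    rw [List.take_of_length_le (by omega)]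
  | succ m ih =>
    intro i hist him hlen hN
    rw [List.range'_succ]
    simp only [refLoop]
    rw [hN i (le_refl i), if_neg (by omega)]
    rw [ih (i+1) (hist.set i 0) (by omega) (by simp [hlen]) (fun j hj => hN j (by omega))]
    have hi : i < hist.length := by omega
    rw [List.take_add_one,
      (by simp [List.take_set, List.set_eq_of_length_le (by simp : (List.take i hist).length ≤ i)] :
        (hist.set i (0:Int)).take i = hist.take i),
      List.getElem?_set_self hi]
    simp [List.replicate_succ]

-- B's counting scan is the reference scan: the running difference over the buckets
-- is exactly the cohort size at each position
theorem histLoop2_eq (cnt : List Int) (l : List String) (g : String → Nat) (n mx : Nat)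
    (hmx : ∀ v ∈ l, g v ≤ mx) (hmxn : mx ≤ n)
    (hcnt : ∀ k, cnt.getD k 0 = ((l.countP (fun v => g v == k)) : Int)) :
    ∀ (k i : Nat) (hist : List Int) (run up : Int), i + k = mx → hist.length = n →
      run = ((l.countP (fun v => decide (i ≤ g v))) : Int) →
      histLoop2 cnt n mx up (PySem.List.pyRange (i : Int) (mx : Int) 1) run hist
        = refLoop (fun j => ((l.countP (fun v => decide (j + 1 ≤ g v))) : Int)) up
            (List.range' i (n - i)) hist := by
  intro k
  induction k with
  | zero =>
    intro i hist run up hik hlen _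
    rw [PySem.List.pyRange_one_eq_nil (by exact_mod_cast (by omega : mx ≤ i))]
    simp only [histLoop2]
    have hz : ∀ j, i ≤ j → ((l.countP (fun v => decide (j + 1 ≤ g v))) : Int) = 0 := by
      intro j hj
      rw [List.countP_eq_zero.mpr]
      · simp
      · intro v hv
        have := hmx v hv
        simp only [decide_eq_true_eq]
        omega
    rw [refLoop_zeros _ up n (n - i) i hist (by omega) hlen hz]
    by_cases hlt : mx < n
    · rw [if_pos hlt]
      have : i = mx := by omega
      subst this
      rfl
    · rw [if_neg hlt]
      have hi : i = n := by omega
      subst hi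
      rw [List.take_of_length_le (by omega)]
      simp
  | succ k ih =>
    intro i hist run up hik hlen hrun
    have hi : i < mx := by omega
    rw [PySem.List.pyRange_one_cons (by exact_mod_cast hi)]
    simp only [histLoop2]
    have hsplit := countP_split l g i
    have hrun' : run - PySem.List.pyGetD cnt (i : Int) 0
        = ((l.countP (fun v => decide (i + 1 ≤ g v))) : Int) := by
      rw [PySem.List.pyGetD_natCast, hcnt i, hrun]
      push_cast [hsplit]
      ring
    rw [hrun', PySem.List.pySetD_natCast]
    have hrange : n - i = (n - (i+1)) + 1 := by omega
    rw [hrange, List.range'_succ]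
    simp only [refLoop]
    by_cases h1 : ((l.countP (fun v => decide (i + 1 ≤ g v))) : Int) = 1
    · rw [if_pos h1, if_pos h1]
    · rw [if_neg h1, if_neg h1]
      have hc : ((i : Int) + 1) = ((i + 1 : Nat) : Int) := by omega
      rw [hc]
      exact ih (i+1) _ _ up (by omega) (by simp [hlen]) rfl

-- the running-maximum loop bounds every bucket index
theorem foldl_mx_spec (g : String → Nat) (n : Nat) (hg : ∀ v, g v ≤ n) :
    ∀ (l : List String) (a : Nat), a ≤ n →
      a ≤ l.foldl (fun mx v => if g v > mx then g v else mx) a ∧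
      (∀ v ∈ l, g v ≤ l.foldl (fun mx v => if g v > mx then g v else mx) a) ∧
      l.foldl (fun mx v => if g v > mx then g v else mx) a ≤ n := by
  intro l
  induction l with
  | nil => intro a ha; exact ⟨le_refl a, by simp, by simpa using ha⟩
  | cons v rest ih =>
    intro a ha
    rw [List.foldl_cons]
    obtain ⟨h0, h1, h2⟩ := ih (if g v > a then g v else a) (by split <;> [exact hg v; exact ha])
    refine ⟨le_trans (by split <;> omega) h0, ?_, h2⟩
    intro w hw
    rcases List.mem_cons.mp hw with hw | hw
    · subst hw
      exact le_trans (by split <;> omega) h0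
    · exact h1 w hw

-- the two programs agree everywhere
theorem main_eq (word : String) (cohort : List String) :
    calculate_up word cohort = calculate_up_alt word cohort := by
  unfold calculate_up calculate_up_alt
  set n := word.toList.length with hn
  -- A side
  have hlen : (PySem.Str.len word : Int) = (n : Int) := by simp [hn]
  have hinit : ((PySem.List.pyRange 0 (PySem.Str.len word) 1).map (fun _ => (1 : Int)))
      = List.replicate n (1 : Int) := by
    rw [List.map_const']
    congr 1
    rw [PySem.Str.len_eq, PySem.List.length_pyRange_one]
    simp [hn]
  rw [hinit]
  have h0 : (0 : Int) = ((0 : Nat) : Int) := by simp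
  have hA : calcLoop word (PySem.List.pyRange 0 (PySem.Str.len word) 1) cohort
      (List.replicate n (1:Int)) ((PySem.Str.len word : Int) - 1)
      = refLoop (Ncount word cohort) ((n : Int) - 1) (List.range' 0 n) (List.replicate n (1:Int)) := by
    rw [hlen, h0]
    exact calcLoop_eq word cohort n 0 cohort (List.replicate n 1) ((n:Int)-1) (by omega) (by simp)
  rw [hA]
  -- B side: split the pair fold into the bucket fold and the running-max fold
  dsimp only
  rw [PySem.List.foldl_prod_mk
    (f := fun (cnt : List Int) (v : String) => List.set cnt (matchlen word.toList v.toList 0) ((cnt.getD (matchlen word.toList v.toList 0) 0) + 1))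
    (g := fun (mxa : Nat) (v : String) => if matchlen word.toList v.toList 0 > mxa then matchlen word.toList v.toList 0 else mxa)]
  set l : List String := PySem.Set.ofList cohort with hl
  set cnt := l.foldl (fun (cnt : List Int) (v : String) => List.set cnt (matchlen word.toList v.toList 0) ((cnt.getD (matchlen word.toList v.toList 0) 0) + 1)) (List.replicate (n+1) (0:Int)) with hcntd
  set mx := l.foldl (fun (mxa : Nat) (v : String) => if matchlen word.toList v.toList 0 > mxa then matchlen word.toList v.toList 0 else mxa) 0 with hmxd
  have hgn : ∀ (v : String), matchlen word.toList v.toList 0 ≤ n := by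
    intro v; rw [matchlen_zero]; exact lcpLen_le_left ..
  obtain ⟨-, hmx, hmxn⟩ :=
    foldl_mx_spec (fun (v : String) => matchlen word.toList v.toList 0) n (fun v => hgn v) l 0 (Nat.zero_le n)
  have hcntk : ∀ k, cnt.getD k 0
      = ((l.countP (fun v => matchlen word.toList v.toList 0 == k)) : Int) := by
    intro k
    rw [hcntd, foldl_bump_getD (fun v => matchlen word.toList v.toList 0) l _ k
      (by intro v _; simp only [List.length_replicate]; have := hgn v; omega)]
    have : (List.replicate (n+1) (0:Int)).getD k 0 = 0 := by
      rw [List.getD_eq_getElem?_getD, List.getElem?_replicate]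
      split <;> simp
    rw [this, zero_add]
  have hrun0 : PySem.Set.len l
      = ((l.countP (fun v => decide (0 ≤ matchlen word.toList v.toList 0))) : Int) := by
    have : (fun (v : String) => decide (0 ≤ matchlen word.toList v.toList 0)) = (fun _ => true) := by
      funext v; simp
    rw [this, List.countP_true, PySem.Set.len]
  have hB := histLoop2_eq cnt l (fun v => matchlen word.toList v.toList 0) n mx hmx hmxn hcntk
    mx 0 (List.replicate n (1:Int)) (PySem.Set.len l) ((n:Int)-1)
    (by omega) (by simp) hrun0
  simp only [Nat.cast_zero, Nat.sub_zero] at hB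
  have hfun : (fun j => ((l.countP (fun v => decide (j + 1 ≤ matchlen word.toList v.toList 0))) : Int))
      = Ncount word cohort := by
    funext j
    unfold Ncount
    congr 1
    apply List.countP_congr
    intro v _
    simp [matchlen_zero, pMatch]
  rw [hfun] at hB
  exact hB.symm

-- ===== VERDICT (by name: the statement is the Claim_ definition above) =====
theorem calculate_up_spec : Claim_equal_calculate_up := by
  intro word cohort _
  unfold Spec_calculate_up
  exact main_eq word cohort
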